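-- pv_equiv track=rewrite | github.com/eugeneng1150/CS1010s-study | PE_study/PE_question_bank.py | int_count_digits
-- ===== SOURCE A (Python) =====
-- def int_count_digits(n):
--     count = 0
--     while n > 0: # uses idea of int PATTERN 1
--         last = n % 10
--         if last != 0:
--             count += 1
--         n = n // 10
--     return count
-- ===== SOURCE B (Python) =====
-- def int_count_digits(n):
--     return sum(c != '0' for c in str(max(n, 0)))
-- ===== Notes on version B (the rewrite author's own statement) =====
-- stated objective: idiomatic
-- what changed: B counts the non-'0' characters of the decimal string str(max(n,0)) instead of extracting digits arithmetically with modulus and floor division in a while loop.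
import Mathlib
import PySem

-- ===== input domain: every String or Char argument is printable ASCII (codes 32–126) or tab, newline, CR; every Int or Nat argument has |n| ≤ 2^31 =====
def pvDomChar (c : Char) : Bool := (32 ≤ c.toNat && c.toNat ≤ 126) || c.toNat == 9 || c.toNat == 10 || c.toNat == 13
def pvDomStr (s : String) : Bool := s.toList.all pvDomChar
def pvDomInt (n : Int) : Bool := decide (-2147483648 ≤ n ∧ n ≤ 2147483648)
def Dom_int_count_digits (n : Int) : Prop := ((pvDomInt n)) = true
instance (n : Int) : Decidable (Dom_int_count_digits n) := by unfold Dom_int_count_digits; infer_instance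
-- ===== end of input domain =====

-- ===== PORT A =====
-- B counts nonzero characters of the decimal string instead of an arithmetic %/ // loop (idiomatic rewrite; return value proved equal).
def int_count_digits_loop (n count : Int) : Int :=
  if h : n > 0 then
    let last := PySem.Int.mod n 10
    int_count_digits_loop (PySem.Int.floordiv n 10) (if last ≠ 0 then count + 1 else count)
  else count
termination_by n.toNat
decreasing_by
  simp only [PySem.Int.floordiv]
  have h10 : Int.fdiv n 10 = n / 10 := Int.fdiv_eq_ediv_of_nonneg n (by norm_num)
  omega

def int_count_digits (n : Int) : Int := int_count_digits_loop n 0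


-- ===== PORT B =====
def int_count_digits_alt (n : Int) : Int :=
  ((PySem.Int.toStr (max n 0)).toList.countP (fun c => c != '0') : Nat)


-- ===== PRECONDITION & SPEC =====
def Spec_int_count_digits (n : Int) (out : Int) : Prop := out = int_count_digits_alt n
instance (n : Int) (out : Int) : Decidable (Spec_int_count_digits n out) := by unfold Spec_int_count_digits; infer_instance

-- ===== CLAIM (what is proved, stated in full; the proofs are below) =====
def Claim_equal_int_count_digits : Prop := ∀ (n : Int), Dom_int_count_digits n → Spec_int_count_digits n (int_count_digits n)

-- ===== LEMMAS AND PROOFS =====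

-- g m = number of nonzero decimal digits of m (A's loop, on Nat)
def nzDigits (m : Nat) : Nat :=
  if m = 0 then 0 else (if m % 10 ≠ 0 then 1 else 0) + nzDigits (m / 10)
decreasing_by exact Nat.div_lt_self (by omega) (by norm_num)

lemma digitChar_ne_zero (d : Nat) (hd : d < 10) :
    ((Nat.digitChar d != '0') = true) ↔ d ≠ 0 := by
  interval_cases d <;> simp [Nat.digitChar]

lemma toDigitsCore_countP (fuel : Nat) : ∀ (m : Nat) (ds : List Char), m < 10 ^ fuel →
    (Nat.toDigitsCore 10 fuel m ds).countP (fun c => c != '0')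
      = nzDigits m + ds.countP (fun c => c != '0') := by
  induction fuel with
  | zero =>
    intro m ds h
    have hm : m = 0 := by simpa using h
    subst hm
    simp [Nat.toDigitsCore, nzDigits]
  | succ fuel ih =>
    intro m ds h
    rw [Nat.toDigitsCore]
    by_cases h0 : m / 10 = 0
    · simp only [h0, reduceIte]
      rw [nzDigits]
      have hm : m < 10 := by omega
      by_cases hz : m = 0
      · subst hz
        rw [nzDigits]
        simp [Nat.digitChar]
      · rw [if_neg hz]
        have hmod : m % 10 = m := Nat.mod_eq_of_lt hm
        by_cases hnz : m % 10 = 0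
        · omega
        · have : (Nat.digitChar (m % 10) != '0') = true :=
            (digitChar_ne_zero _ (Nat.mod_lt _ (by norm_num))).mpr hnz
          rw [nzDigits, if_pos h0]
          simp [this, hnz]
          omega
    · rw [if_neg h0]
      have hlt : m / 10 < 10 ^ fuel := by
        rw [Nat.div_lt_iff_lt_mul (show 0 < 10 by norm_num)]
        calc m < 10 ^ (fuel + 1) := h
          _ = 10 ^ fuel * 10 := by ring
      rw [ih _ _ hlt, List.countP_cons]
      rw [show nzDigits m = (if m % 10 ≠ 0 then 1 else 0) + nzDigits (m / 10) by
        rw [nzDigits]; rw [if_neg (by omega)]]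
      by_cases hnz : m % 10 = 0
      · simp [hnz, Nat.digitChar]
      · have : (Nat.digitChar (m % 10) != '0') = true :=
          (digitChar_ne_zero _ (Nat.mod_lt _ (by norm_num))).mpr hnz
        simp [this, hnz]
        omega

lemma toDigits_countP (m : Nat) :
    (Nat.toDigits 10 m).countP (fun c => c != '0') = nzDigits m := by
  rw [Nat.toDigits]
  rw [toDigitsCore_countP (m + 1) m []
    (lt_of_lt_of_le (Nat.lt_pow_self (by norm_num)) (Nat.pow_le_pow_right (by norm_num) (by omega)))]
  simp

lemma loop_eq (k : Nat) : ∀ (n c : Int), 0 ≤ n → n.toNat = k →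
    int_count_digits_loop n c = c + (nzDigits k : Int) := by
  induction k using Nat.strong_induction_on with
  | _ k ih =>
    intro n c hn hk
    rw [int_count_digits_loop]
    by_cases hpos : n > 0
    · rw [dif_pos hpos]
      have hfd : Int.fdiv n 10 = n / 10 := Int.fdiv_eq_ediv_of_nonneg n (by norm_num)
      have hfm : Int.fmod n 10 = n % 10 := Int.fmod_eq_emod_of_nonneg n (by norm_num)
      have hd : (PySem.Int.floordiv n 10).toNat = k / 10 := by
        simp only [PySem.Int.floordiv, hfd]; omega
      have hdlt : k / 10 < k := Nat.div_lt_self (by omega) (by norm_num)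
      rw [ih _ hdlt _ _ (by simp only [PySem.Int.floordiv, hfd]; positivity) hd]
      rw [show nzDigits k = (if k % 10 ≠ 0 then 1 else 0) + nzDigits (k / 10) by
        rw [nzDigits]; rw [if_neg (by omega)]]
      have hm : PySem.Int.mod n 10 = (k % 10 : Nat) := by
        simp only [PySem.Int.mod, hfm]; omega
      by_cases hz : k % 10 = 0
      · rw [hm]; simp [hz]
      · rw [hm]
        rw [if_pos (by exact_mod_cast hz)]
        simp [hz]
        ring
    · rw [dif_neg hpos]
      have : k = 0 := by omega
      subst this
      rw [nzDigits]
      simp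

-- ===== VERDICT (by name: the statement is the Claim_ definition above) =====
theorem int_count_digits_spec : Claim_equal_int_count_digits := by
  intro n _
  unfold Spec_int_count_digits int_count_digits int_count_digits_alt
  by_cases hpos : 0 < n
  · rw [loop_eq n.toNat n 0 (by omega) rfl]
    rw [max_eq_left (by omega), PySem.Int.toList_toStr, PySem.Int.toChars,
      if_neg (by omega), toDigits_countP]
    ring
  · rw [int_count_digits_loop, dif_neg (by omega)]
    rw [max_eq_right (by omega)]
    decide
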